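-- pv_equiv track=rewrite | github.com/quvi007/crypto-sys | aes.py | circularByteShift
-- ===== SOURCE A (Python) =====
-- def circularByteShift(arr, right = 0):
--     new_arr = arr.copy()
--     n = len(new_arr)
--     if right == 1:
--         x = new_arr[n - 1]
--         for i in range(n - 1, 0, -1):
--             new_arr[i] = new_arr[i - 1]
--         new_arr[0] = x
--     else:
--         x = new_arr[0]
--         for i in range(1, n):
--             new_arr[i - 1] = new_arr[i]
--         new_arr[n - 1] = x
--     return new_arr
-- ===== SOURCE B (Python) =====
-- def circularByteShift(arr, right=0):
--     if right == 1:
--         return arr[-1:] + arr[:-1]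
--     return arr[1:] + arr[:1]
-- ===== Notes on version B (the rewrite author's own statement) =====
-- stated objective: simpler
-- what changed: Replaces the element-by-element shifting loop over a mutable copy with two slice expressions concatenated (last element + rest, or tail + first element); slicing runs in C, removing the per-element Python-level loop.
-- crash fix: On the empty list A raises IndexError (new_arr[n-1]/new_arr[0] on an empty copy) while B's slices return []. — e.g. on circularByteShift([], 0): A raises IndexError, B returns []
import Mathlib
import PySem

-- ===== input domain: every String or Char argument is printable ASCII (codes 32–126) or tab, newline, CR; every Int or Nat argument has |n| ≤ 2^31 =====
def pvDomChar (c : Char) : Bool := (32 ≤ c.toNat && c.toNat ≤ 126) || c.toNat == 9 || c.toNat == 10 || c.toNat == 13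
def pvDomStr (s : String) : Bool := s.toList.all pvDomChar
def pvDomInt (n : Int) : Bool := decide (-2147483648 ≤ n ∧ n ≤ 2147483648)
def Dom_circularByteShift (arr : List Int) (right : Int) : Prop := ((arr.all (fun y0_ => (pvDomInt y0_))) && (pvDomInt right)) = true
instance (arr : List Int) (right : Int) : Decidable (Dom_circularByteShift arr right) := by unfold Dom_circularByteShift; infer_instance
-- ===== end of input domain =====

-- B replaces A's index-by-index shifting loop over a mutable copy with two slice
-- expressions concatenated; equal results on nonempty arr (A raises IndexError on []).

-- ===== PORT A =====
-- literal transliteration: copy, read x, shift loop over range, write x back;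
-- the initial read new_arr[n-1] / new_arr[0] is pyGet? (none = IndexError, excluded by Pre_;
-- the port returns [] there, outside the claim); loop indices are provably in range, so the
-- element writes are List.set and the in-loop reads pyGetD.
def circularByteShift (arr : List Int) (right : Int) : List Int :=
  let new_arr := arr
  let n : Int := new_arr.length
  if right == 1 then
    match PySem.List.pyGet? new_arr (n - 1) with
    | none => []
    | some x =>
      let na := (PySem.List.pyRange (n - 1) 0 (-1)).foldl
        (fun na i => na.set i.toNat (PySem.List.pyGetD na (i - 1) 0)) new_arr
      na.set 0 x
  else
    match PySem.List.pyGet? new_arr 0 with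
    | none => []
    | some x =>
      let na := (PySem.List.pyRange 1 n 1).foldl
        (fun na i => na.set (i - 1).toNat (PySem.List.pyGetD na i 0)) new_arr
      na.set (n - 1).toNat x

-- ===== PORT B =====
def circularByteShift_alt (arr : List Int) (right : Int) : List Int :=
  if right == 1 then
    PySem.List.slice arr (some (-1)) none ++ PySem.List.slice arr none (some (-1))
  else
    PySem.List.slice arr (some 1) none ++ PySem.List.slice arr none (some 1)

-- ===== PRECONDITION & SPEC =====
-- Pre_ excludes only the empty list, on which the Python A raises IndexError.
def Pre_circularByteShift (arr : List Int) (right : Int) : Prop := arr ≠ []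
instance (arr : List Int) (right : Int) : Decidable (Pre_circularByteShift arr right) := by
  unfold Pre_circularByteShift; infer_instance

def pvWitness_circularByteShift : List Int × Int := ([1, 2, 3], 1)

-- On the empty list A raises IndexError (indexing into an empty copy) while B's slices return [].
def Raises_circularByteShift (arr : List Int) (right : Int) : Prop := arr = []
instance (arr : List Int) (right : Int) : Decidable (Raises_circularByteShift arr right) := by
  unfold Raises_circularByteShift; infer_instance
def pvRaiseWitness_circularByteShift : List Int × Int := ([], 0)
def pvRaiseWitnessOut_circularByteShift : List Int := []

def Spec_circularByteShift (arr : List Int) (right : Int) (out : List Int) : Prop :=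
  out = circularByteShift_alt arr right
instance (arr : List Int) (right : Int) (out : List Int) : Decidable (Spec_circularByteShift arr right out) := by
  unfold Spec_circularByteShift; infer_instance

-- ===== CLAIM (what is proved, stated in full; the proofs are below) =====
def Claim_equal_circularByteShift : Prop := ∀ (arr : List Int) (right : Int),
  Dom_circularByteShift arr right → Pre_circularByteShift arr right →
  Spec_circularByteShift arr right (circularByteShift arr right)

def Claim_raises_circularByteShift : Prop :=
  (∀ (arr : List Int) (right : Int), Dom_circularByteShift arr right →
      Raises_circularByteShift arr right → ¬ Pre_circularByteShift arr right) ∧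
  (Dom_circularByteShift (pvRaiseWitness_circularByteShift.1) (pvRaiseWitness_circularByteShift.2) ∧
   Raises_circularByteShift (pvRaiseWitness_circularByteShift.1) (pvRaiseWitness_circularByteShift.2) ∧
   circularByteShift_alt (pvRaiseWitness_circularByteShift.1) (pvRaiseWitness_circularByteShift.2)
     = pvRaiseWitnessOut_circularByteShift)

-- ===== LEMMAS AND PROOFS =====

lemma leftLoop (xs : List Int) : ∀ (ys : List Int) (y : Int),
    (PySem.List.pyRange (ys.length + 1) ((ys.length : Int) + 1 + xs.length) 1).foldl
      (fun na i => na.set (i - 1).toNat (PySem.List.pyGetD na i 0)) ((ys ++ [y]) ++ xs)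
    = (ys ++ xs) ++ [xs.getLastD y] := by
  induction xs with
  | nil => intro ys y; simp [PySem.List.pyRange_one_eq_nil]
  | cons x xs ih =>
    intro ys y
    rw [PySem.List.pyRange_one_cons (by simp only [List.length_cons]; push_cast; omega)]
    simp only [List.foldl_cons]
    have hget : PySem.List.pyGetD ((ys ++ [y]) ++ x :: xs) ((ys.length : Int) + 1) 0 = x := by
      have h : ((ys.length : Int) + 1) = ((ys.length + 1 : Nat) : Int) := by push_cast; ring
      rw [h, PySem.List.pyGetD_natCast]
      rw [show (ys ++ [y]) ++ x :: xs = (ys ++ [y]) ++ (x :: xs) from rfl]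
      rw [List.getD_eq_getElem?_getD, List.getElem?_append_right (by simp)]
      simp
    have hset : ((ys ++ [y]) ++ x :: xs).set ((ys.length : Int) + 1 - 1).toNat x
        = ((ys ++ [x]) ++ [x]) ++ xs := by
      have h1 : ((ys.length : Int) + 1 - 1).toNat = ys.length := by omega
      rw [h1, show (ys ++ [y]) ++ x :: xs = ys ++ (y :: (x :: xs)) by simp]
      rw [List.set_append_right _ _ (le_refl _)]
      simp
    rw [hget, hset]
    have harith : (ys.length : Int) + 1 + ((x :: xs).length : Int)
        = ((ys ++ [x]).length : Int) + 1 + (xs.length : Int) := by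
      push_cast [List.length_cons, List.length_append, List.length_nil]; ring
    have hidx : (ys.length : Int) + 1 + 1 = ((ys ++ [x]).length : Int) + 1 := by
      push_cast [List.length_cons, List.length_append, List.length_nil]; ring
    rw [harith, hidx, ih (ys ++ [x]) x]
    have hlast : xs.getLastD x = (x :: xs).getLastD y := by
      cases xs with
      | nil => simp
      | cons a t =>
        simp only [List.getLastD_eq_getLast?, List.getLast?_cons_cons]
        cases h : (a :: t).getLast? <;> simp_all
    rw [hlast]; simp

lemma rightLoop (ps : List Int) : ∀ (suf : List Int), suf ≠ [] →
    (PySem.List.pyRange (ps.length : Int) 0 (-1)).foldl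
      (fun na i => na.set i.toNat (PySem.List.pyGetD na (i - 1) 0)) (ps.reverse ++ suf)
    = (ps.reverse ++ suf).headD 0 :: (ps.reverse ++ suf.tail) := by
  induction ps with
  | nil =>
    intro suf hsuf
    rw [PySem.List.pyRange_neg_one_eq_nil (by simp)]
    cases suf with
    | nil => exact absurd rfl hsuf
    | cons a t => simp
  | cons p qs ih =>
    intro suf hsuf
    rw [PySem.List.pyRange_neg_one_cons (by push_cast [List.length_cons]; omega)]
    simp only [List.foldl_cons]
    have hget : PySem.List.pyGetD ((p :: qs).reverse ++ suf) (((p :: qs).length : Int) - 1) 0 = p := by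
      have h : (((p :: qs).length : Int) - 1) = ((qs.length : Nat) : Int) := by
        push_cast [List.length_cons]; ring
      rw [h, PySem.List.pyGetD_natCast]
      rw [show (p :: qs).reverse ++ suf = qs.reverse ++ ([p] ++ suf) by simp]
      rw [List.getD_eq_getElem?_getD, List.getElem?_append_right (by simp)]
      simp
    have hset : ((p :: qs).reverse ++ suf).set ((p :: qs).length : Int).toNat p
        = qs.reverse ++ (p :: p :: suf.tail) := by
      have h1 : ((p :: qs).length : Int).toNat = qs.length + 1 := by simp
      rw [h1, show (p :: qs).reverse ++ suf = qs.reverse ++ (p :: suf) by simp]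
      rw [List.set_append_right _ _ (by simp)]
      cases suf with
      | nil => exact absurd rfl hsuf
      | cons a t => simp
    rw [hget]
    have hstep : ((p :: qs).length : Int) - 1 = (qs.length : Int) := by
      push_cast [List.length_cons]; ring
    rw [hstep, hset, ih (p :: p :: suf.tail) (by simp)]
    have hhead : (qs.reverse ++ p :: p :: suf.tail).headD 0 = ((p :: qs).reverse ++ suf).headD 0 := by
      cases hq : qs.reverse with
      | nil =>
        have : (p :: qs).reverse = [p] := by simp [List.reverse_cons, hq]
        cases suf with
        | nil => exact absurd rfl hsuf
        | cons a t => simp [this]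
      | cons b bs =>
        have : (p :: qs).reverse = b :: (bs ++ [p]) := by simp [List.reverse_cons, hq]
        simp [this]
    rw [hhead]
    simp

lemma rightLoop' (ys : List Int) (z : Int) :
    (PySem.List.pyRange (ys.length : Int) 0 (-1)).foldl
      (fun na i => na.set i.toNat (PySem.List.pyGetD na (i - 1) 0)) (ys ++ [z])
    = (ys ++ [z]).headD 0 :: ys := by
  have h := rightLoop ys.reverse [z] (by simp)
  simpa using h


-- ===== VERDICT (by name: the statement is the Claim_ definition above) =====
theorem circularByteShift_spec : Claim_equal_circularByteShift := by
  intro arr right _ hpre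
  unfold Spec_circularByteShift circularByteShift circularByteShift_alt
  by_cases hr : right == 1
  · obtain ⟨ys, z, rfl⟩ := (List.eq_nil_or_concat arr).resolve_left hpre
    simp only [hr, if_true, List.concat_eq_append]
    rw [show (((ys ++ [z]).length : Int) - 1) = ((ys.length : Nat) : Int) by
      push_cast [List.length_append, List.length_cons, List.length_nil]; ring]
    rw [PySem.List.pyGet?_natCast]
    rw [List.getElem?_append_right (le_refl _)]
    simp only [Nat.sub_self, List.getElem?_cons_zero]
    rw [rightLoop' ys z]
    rw [PySem.List.slice_from_neg_one, PySem.List.slice_to_neg_one]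
    simp
  · cases arr with
    | nil => exact absurd rfl hpre
    | cons a t =>
      simp only [hr, Bool.false_eq_true, if_false]
      have h0 : PySem.List.pyGet? (a :: t) 0 = some a := by
        rw [show (0 : Int) = ((0 : Nat) : Int) by simp, PySem.List.pyGet?_natCast]; simp
      rw [h0]
      dsimp only
      have hL := leftLoop t [] a
      simp only [List.length_nil, Nat.cast_zero, List.nil_append, zero_add] at hL
      rw [show ((a :: t).length : Int) = (1 : Int) + (t.length : Int) by
        push_cast [List.length_cons]; ring]
      rw [show (([a] : List Int) ++ t) = a :: t from rfl] at hL
      rw [hL]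
      rw [show ((1 : Int) + (t.length : Int) - 1).toNat = t.length by omega]
      rw [List.set_append_right _ _ (le_refl _)]
      rw [PySem.List.slice_from_one,
        show PySem.List.slice (a :: t) none (some 1) = [a] by
          rw [PySem.List.slice_to (a :: t) (show (0:Int) ≤ 1 by norm_num)]; simp]
      simp

@[simp] theorem circularByteShift_raises : Claim_raises_circularByteShift := by
  unfold Claim_raises_circularByteShift
  exact ⟨fun arr right _ h => by
      simp only [Raises_circularByteShift] at h
      simp [Pre_circularByteShift, h],
    by decide⟩
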